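-- pv_equiv track=rewrite | github.com/becksha12/VOD-OCR | detect_ads.py | post_process_time_string
-- ===== SOURCE A (Python) =====
-- import string
--
-- def post_process_time_string(time_string):
--     start = 0
--     while time_string[start] not in string.digits:
--         start += 1
--     end = len(time_string) - 1
--     while time_string[end] not in string.digits:
--         end -= 1
--     return time_string[start:end+1]
-- ===== SOURCE B (Python) =====
-- import string
--
-- def post_process_time_string(time_string):
--     idx = [i for i, c in enumerate(time_string) if c in string.digits]
--     return time_string[idx[0]:idx[-1] + 1]
-- ===== Notes on version B (the rewrite author's own statement) =====
-- stated objective: simpler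
-- what changed: Replaces the two inward-scanning index while loops with one forward pass collecting all digit positions, then slices between the first and last collected index.
import Mathlib
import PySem

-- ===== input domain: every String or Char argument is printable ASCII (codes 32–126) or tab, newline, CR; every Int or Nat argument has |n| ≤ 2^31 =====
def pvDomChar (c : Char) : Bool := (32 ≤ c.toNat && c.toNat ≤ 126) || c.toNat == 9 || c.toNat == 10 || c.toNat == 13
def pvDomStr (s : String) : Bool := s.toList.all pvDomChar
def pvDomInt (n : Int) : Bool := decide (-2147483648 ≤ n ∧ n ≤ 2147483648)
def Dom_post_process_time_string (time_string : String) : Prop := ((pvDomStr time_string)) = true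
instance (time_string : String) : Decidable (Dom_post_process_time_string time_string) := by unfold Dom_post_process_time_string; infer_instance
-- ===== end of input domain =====

-- B replaces A's two inward-scanning while loops by one forward pass collecting the digit
-- indices and a slice between the first and last one (objective: simpler).

-- ===== PORT A =====
-- `c in string.digits` on the one-character string time_string[i]: exactly "c is one of '0'..'9'",
-- which is Char.isDigit.
def pvDigit (c : Char) : Bool := c.isDigit

-- `while time_string[start] not in string.digits: start += 1`; fuel-bounded; the `none` branch is
-- Python's IndexError (excluded by Pre_).
def pvAStart (l : List Char) (start : Nat) : Nat → Nat
  | 0 => start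
  | f + 1 =>
    match PySem.List.pyGet? l (start : Int) with
    | none => start
    | some c => if pvDigit c then start else pvAStart l (start + 1) f

-- `while time_string[end] not in string.digits: end -= 1`; the index is an Int (it can go
-- negative in Python and wrap); `none` = IndexError (excluded by Pre_).
def pvAEnd (l : List Char) (e : Int) : Nat → Int
  | 0 => e
  | f + 1 =>
    match PySem.List.pyGet? l e with
    | none => e
    | some c => if pvDigit c then e else pvAEnd l (e - 1) f

def post_process_time_string (time_string : String) : String :=
  let l := time_string.toList
  let start := pvAStart l 0 (l.length + 1)
  let e := pvAEnd l ((l.length : Int) - 1) (l.length + 1)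
  String.ofList (PySem.List.slice l (some (start : Int)) (some (e + 1)))

-- ===== PORT B =====
def post_process_time_string_alt (time_string : String) : String :=
  let l := time_string.toList
  let idx := ((PySem.List.enumerate l 0).filter (fun p => pvDigit p.2)).map (·.1)
  match idx.head?, idx.getLast? with
  | some i, some j => String.ofList (PySem.List.slice l (some i) (some (j + 1)))
  | _, _ => ""  -- idx[0] raises IndexError (excluded by Pre_)

-- ===== PRECONDITION & SPEC =====
-- A raises IndexError exactly when the string contains no digit (the first while loop runs off
-- the right end, on the empty string immediately); Pre_ excludes exactly those inputs.
def Pre_post_process_time_string (time_string : String) : Prop :=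
  time_string.toList.any (fun c => c.isDigit) = true
instance (time_string : String) : Decidable (Pre_post_process_time_string time_string) := by
  unfold Pre_post_process_time_string; infer_instance

def pvWitness_post_process_time_string : String := " 12:30 pm"

def Spec_post_process_time_string (time_string : String) (out : String) : Prop :=
  out = post_process_time_string_alt time_string
instance (time_string : String) (out : String) : Decidable (Spec_post_process_time_string time_string out) := by
  unfold Spec_post_process_time_string; infer_instance

-- ===== CLAIM (what is proved, stated in full; the proofs are below) =====
def Claim_equal_post_process_time_string : Prop :=
  ∀ (time_string : String), Dom_post_process_time_string time_string →
    Pre_post_process_time_string time_string →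
    Spec_post_process_time_string time_string (post_process_time_string time_string)

-- ===== LEMMAS AND PROOFS =====

-- the digit-index list of B's port, with a running offset for the induction
def pvDig (l : List Char) (s : Int) : List Int :=
  ((PySem.List.enumerate l s).filter (fun p => pvDigit p.2)).map (·.1)

-- the index of the LAST digit of l (meaningful when l.any pvDigit)
def pvLastD : List Char → Nat
  | [] => 0
  | _ :: t => if t.any pvDigit then pvLastD t + 1 else 0

theorem pvDig_cons (c : Char) (t : List Char) (s : Int) :
    pvDig (c :: t) s = if pvDigit c then s :: pvDig t (s + 1) else pvDig t (s + 1) := by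
  simp only [pvDig, PySem.List.enumerate_cons, List.filter_cons]
  split <;> simp_all

theorem pvDig_nil_of_none (t : List Char) (s : Int) (h : t.any pvDigit = false) :
    pvDig t s = [] := by
  induction t generalizing s with
  | nil => rfl
  | cons c t ih =>
    simp only [List.any_cons, Bool.or_eq_false_iff] at h
    rw [pvDig_cons, if_neg (by simp [h.1]), ih _ h.2]

theorem pvDig_ne_nil (l : List Char) (s : Int) (h : l.any pvDigit = true) :
    pvDig l s ≠ [] := by
  induction l generalizing s with
  | nil => simp at h
  | cons c t ih =>
    rw [pvDig_cons]
    split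
    · simp
    · simp only [List.any_cons] at h
      exact ih (s + 1) (by simp_all)

theorem pvDig_head (l : List Char) (s : Int) (h : l.any pvDigit = true) :
    (pvDig l s).head? = some (s + (l.findIdx pvDigit : Int)) := by
  induction l generalizing s with
  | nil => simp at h
  | cons c t ih =>
    rw [pvDig_cons]
    by_cases hc : pvDigit c
    · rw [if_pos hc]
      simp [List.findIdx_cons, hc]
    · rw [if_neg hc]
      simp only [List.any_cons] at h
      have ht : t.any pvDigit = true := by simp_all
      rw [ih (s + 1) ht]
      simp only [List.findIdx_cons, hc, cond_false]
      congr 1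
      push_cast
      ring

theorem pvDig_last (l : List Char) (s : Int) (h : l.any pvDigit = true) :
    (pvDig l s).getLast? = some (s + (pvLastD l : Int)) := by
  induction l generalizing s with
  | nil => simp at h
  | cons c t ih =>
    rw [pvDig_cons]
    by_cases ht : t.any pvDigit = true
    · have hne := pvDig_ne_nil t (s + 1) ht
      have step : (pvDig t (s + 1)).getLast? = some (s + 1 + (pvLastD t : Int)) := ih (s + 1) ht
      have keep : ∀ x : Int, (x :: pvDig t (s + 1)).getLast? = (pvDig t (s + 1)).getLast? := by
        intro x
        cases hd : pvDig t (s + 1) with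
        | nil => exact absurd hd hne
        | cons y ys => simp [List.getLast?_cons_cons]
      have goal : pvLastD (c :: t) = pvLastD t + 1 := by simp [pvLastD, ht]
      rw [goal]
      split
      · rw [keep, step]; congr 1; push_cast; ring
      · rw [step]; congr 1; push_cast; ring
    · have hc : pvDigit c = true := by
        simp only [List.any_cons] at h
        rcases Bool.or_eq_true_iff.mp h with h' | h'
        · exact h'
        · exact absurd h' (by simp [ht])
      rw [if_pos hc, pvDig_nil_of_none t (s + 1) (by simpa using ht)]
      simp [pvLastD, ht]

theorem pvLastD_lt (l : List Char) (h : l.any pvDigit = true) : pvLastD l < l.length := by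
  induction l with
  | nil => simp at h
  | cons c t ih =>
    by_cases ht : t.any pvDigit = true
    · simp only [pvLastD, ht, if_pos, List.length_cons]
      exact Nat.succ_lt_succ (ih ht)
    · simp [pvLastD, ht]

theorem pvLastD_digit (l : List Char) (h : l.any pvDigit = true)
    (hlt : pvLastD l < l.length) : pvDigit l[pvLastD l] = true := by
  induction l with
  | nil => simp at h
  | cons c t ih =>
    by_cases ht : t.any pvDigit = true
    · simp only [pvLastD, ht, if_true, List.getElem_cons_succ, List.length_cons] at hlt ⊢
      exact ih ht (by omega)
    · have hc : pvDigit c = true := by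
        simp only [List.any_cons] at h
        rcases Bool.or_eq_true_iff.mp h with h' | h'
        · exact h'
        · exact absurd h' (by simp [ht])
      simp only [pvLastD, if_neg ht, List.getElem_cons_zero]
      exact hc

theorem pvLastD_max (l : List Char) (k : Nat) (hk : k < l.length)
    (hgt : pvLastD l < k) : pvDigit l[k] = false := by
  induction l generalizing k with
  | nil => simp at hk
  | cons c t ih =>
    by_cases ht : t.any pvDigit = true
    · have he : pvLastD (c :: t) = pvLastD t + 1 := by simp [pvLastD, ht]
      rw [he] at hgt
      match k, hk with
      | k' + 1, hk =>
        simpa using ih k' (Nat.lt_of_succ_lt_succ hk) (Nat.lt_of_succ_lt_succ hgt)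
    · match k, hk with
      | k' + 1, hk =>
        have hk' : k' < t.length := by simp only [List.length_cons] at hk; omega
        have hno : t.any pvDigit = false := by simpa using ht
        simp only [List.getElem_cons_succ]
        have := List.any_eq_false.mp hno _ (List.getElem_mem hk')
        simpa using this

-- A's first while loop finds the first digit index
theorem pvAStart_spec (l : List Char) (fuel start : Nat)
    (hj : l.findIdx pvDigit < l.length) (hs : start ≤ l.findIdx pvDigit)
    (hfuel : l.findIdx pvDigit - start < fuel) :
    pvAStart l start fuel = l.findIdx pvDigit := by
  induction fuel generalizing start with
  | zero => omega
  | succ f ih =>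
    have hlt : start < l.length := lt_of_le_of_lt hs hj
    have hget : PySem.List.pyGet? l (start : Int) = some l[start] := by simp [pysem, hlt]
    rw [pvAStart, hget]
    show (if pvDigit l[start] = true then start else pvAStart l (start + 1) f)
        = l.findIdx pvDigit
    by_cases hd : pvDigit l[start] = true
    · rw [if_pos hd]
      by_contra hne
      have hlt2 : start < l.findIdx pvDigit := lt_of_le_of_ne hs hne
      have hfalse := List.not_of_lt_findIdx hlt2 (xs := l)
      exact Bool.noConfusion (Eq.trans (Eq.symm hd) hfalse)
    · rw [if_neg hd]
      have hlt2 : start < l.findIdx pvDigit := by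
        rcases Nat.lt_or_ge start (l.findIdx pvDigit) with h | h
        · exact h
        · have heq : start = l.findIdx pvDigit := Nat.le_antisymm hs h
          subst heq
          exact absurd List.findIdx_getElem hd
      exact ih (start + 1) hlt2 (by omega)

-- A's second while loop finds the last digit index
theorem pvAEnd_spec (l : List Char) (fuel e : Nat)
    (hany : l.any pvDigit = true) (he : pvLastD l ≤ e) (hel : e < l.length)
    (hfuel : e - pvLastD l < fuel) :
    pvAEnd l (e : Int) fuel = (pvLastD l : Int) := by
  induction fuel generalizing e with
  | zero => omega
  | succ f ih =>
    have hget : PySem.List.pyGet? l (e : Int) = some l[e] := by simp [pysem, hel]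
    rw [pvAEnd, hget]
    show (if pvDigit l[e] = true then (e : Int) else pvAEnd l ((e : Int) - 1) f)
        = (pvLastD l : Int)
    by_cases hd : pvDigit l[e] = true
    · rw [if_pos hd]
      have heq : e = pvLastD l := by
        rcases Nat.lt_or_ge (pvLastD l) e with h | h
        · exact absurd hd (by simp [pvLastD_max l e hel h])
        · omega
      rw [heq]
    · rw [if_neg hd]
      have hgt : pvLastD l < e := by
        rcases Nat.lt_or_ge (pvLastD l) e with h | h
        · exact h
        · have heq : e = pvLastD l := by omega
          subst heq
          exact absurd (pvLastD_digit l hany hel) hd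
      have hcast : (e : Int) - 1 = ((e - 1 : Nat) : Int) := by omega
      rw [hcast]
      exact ih (e - 1) (by omega) (by omega) (by omega)

-- ===== VERDICT (by name: the statement is the Claim_ definition above) =====
theorem post_process_time_string_spec : Claim_equal_post_process_time_string := by
  intro s _hdom hpre
  unfold Spec_post_process_time_string
  unfold Pre_post_process_time_string at hpre
  set l := s.toList with hl
  have hany : l.any pvDigit = true := by simpa [pvDigit] using hpre
  have hfind : l.findIdx pvDigit < l.length := by
    have hany' := hany
    rw [List.any_eq_true] at hany'
    obtain ⟨x, hx, hp⟩ := hany'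
    exact List.findIdx_lt_length.mpr ⟨x, hx, hp⟩
  have hlen : 1 ≤ l.length := by omega
  have hlast := pvLastD_lt l hany
  have hstart : pvAStart l 0 (l.length + 1) = l.findIdx pvDigit :=
    pvAStart_spec l (l.length + 1) 0 hfind (Nat.zero_le _) (by omega)
  have hcast : ((l.length : Int) - 1) = ((l.length - 1 : Nat) : Int) := by omega
  have hend : pvAEnd l ((l.length : Int) - 1) (l.length + 1) = (pvLastD l : Int) := by
    rw [hcast]
    exact pvAEnd_spec l (l.length + 1) (l.length - 1) hany (by omega) (by omega) (by omega)
  have hidx : ((PySem.List.enumerate l 0).filter (fun p => pvDigit p.2)).map (·.1) = pvDig l 0 := rfl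
  have hhead : (pvDig l 0).head? = some ((l.findIdx pvDigit : Int)) := by
    rw [pvDig_head l 0 hany]; ring_nf
  have hlastq : (pvDig l 0).getLast? = some ((pvLastD l : Int)) := by
    rw [pvDig_last l 0 hany]; ring_nf
  show post_process_time_string s = post_process_time_string_alt s
  unfold post_process_time_string post_process_time_string_alt
  dsimp only
  rw [← hl, hstart, hend, hidx, hhead, hlastq]
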